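-- pv_equiv track=rewrite | github.com/marchiesa/proof-lifting | smt_analysis/category_checks/category_ematching.py | _extract_binders
-- ===== SOURCE A (Python) =====
-- def _extract_binders(forall_text: str) -> list[str]:
--     """Extract bound variable names from 'x1: T1, x2: T2, ...' text."""
--     binders = []
--     # Split on comma (careful: types can contain angle brackets)
--     depth = 0
--     current = []
--     for ch in forall_text:
--         if ch in "<([":
--             depth += 1
--             current.append(ch)
--         elif ch in ">)]":
--             depth -= 1
--             current.append(ch)
--         elif ch == "," and depth == 0:
--             binders.append("".join(current).strip())
--             current = []
--         else:
--             current.append(ch)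
--     if current:
--         binders.append("".join(current).strip())
--
--     names = []
--     for b in binders:
--         # "x: T" or "x1, x2: T" — take name before ":"
--         b = b.strip()
--         if ":" in b:
--             names.append(b[: b.index(":")].strip())
--         else:
--             names.append(b.strip())
--     return [n for n in names if n]
-- ===== SOURCE B (Python) =====
-- def _extract_binders(forall_text: str) -> list[str]:
--     """Extract bound variable names from 'x1: T1, x2: T2, ...' text."""
--     names = []
--     depth = 0
--     buf = []
--     seen_colon = False
--     for ch in forall_text:
--         if ch in "<([":
--             depth += 1
--         elif ch in ">)]":
--             depth -= 1
--         if ch == "," and depth == 0: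
--             name = "".join(buf).strip()
--             if name:
--                 names.append(name)
--             buf = []
--             seen_colon = False
--         elif ch == ":" and not seen_colon:
--             seen_colon = True
--         elif not seen_colon:
--             buf.append(ch)
--     name = "".join(buf).strip()
--     if name:
--         names.append(name)
--     return names
-- ===== Notes on version B (the rewrite author's own statement) =====
-- stated objective: alternative
-- what changed: Replaces A's two-pass design (split the text into comma-separated segments at bracket depth 0, then cut each segment at its first colon) with a single character scan driven by a small state machine (depth, name buffer, seen_colon flag) that never materialises the segments or their type text.
import Mathlib
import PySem

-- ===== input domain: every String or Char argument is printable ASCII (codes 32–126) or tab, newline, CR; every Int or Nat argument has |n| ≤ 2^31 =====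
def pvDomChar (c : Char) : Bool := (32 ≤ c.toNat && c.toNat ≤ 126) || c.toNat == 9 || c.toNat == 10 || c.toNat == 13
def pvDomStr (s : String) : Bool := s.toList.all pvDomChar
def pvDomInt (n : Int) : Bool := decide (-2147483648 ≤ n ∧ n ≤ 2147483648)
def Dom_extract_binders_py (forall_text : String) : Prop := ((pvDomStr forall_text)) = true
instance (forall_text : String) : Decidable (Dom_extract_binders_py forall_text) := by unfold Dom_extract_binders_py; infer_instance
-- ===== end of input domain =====

-- B merges A's two passes (split into segments, then cut each at its first ':') into one
-- character scan with a seen_colon flag; objective: simpler single-pass decomposition (no speed claim).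

-- ===== PORT A =====
-- state: (depth, current, binders); brackets tracked exactly as in the Python
def pvStepA (st : Int × List Char × List (List Char)) (ch : Char) :
    Int × List Char × List (List Char) :=
  let (depth, current, binders) := st
  if ch = '<' ∨ ch = '(' ∨ ch = '[' then (depth + 1, current ++ [ch], binders)
  else if ch = '>' ∨ ch = ')' ∨ ch = ']' then (depth - 1, current ++ [ch], binders)
  else if ch = ',' ∧ depth = 0 then (depth, [], binders ++ [PySem.Chars.strip current])
  else (depth, current ++ [ch], binders)

-- second pass over one segment: b[: b.index(':')] is b.take (b.idxOf ':') (str.index of a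
-- single char present in b = List.idxOf; exact under the '":" in b' guard)
def pvNameA (b0 : List Char) : List Char :=
  let b := PySem.Chars.strip b0
  if ':' ∈ b then PySem.Chars.strip (b.take (b.idxOf ':')) else PySem.Chars.strip b

def extract_binders_py (forall_text : String) : List String :=
  let st := forall_text.toList.foldl pvStepA (0, [], [])
  let binders := if st.2.1 ≠ [] then st.2.2 ++ [PySem.Chars.strip st.2.1] else st.2.2
  let names := binders.map pvNameA
  (names.filter (· ≠ [])).map (fun cs => String.ofList cs)

-- ===== PORT B =====
-- state: (depth, buf, seen_colon, names); one pass, buf collects only the name part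
def pvStepB (st : Int × List Char × Bool × List (List Char)) (ch : Char) :
    Int × List Char × Bool × List (List Char) :=
  let (depth0, buf, seen, names) := st
  let depth := if ch = '<' ∨ ch = '(' ∨ ch = '[' then depth0 + 1
               else if ch = '>' ∨ ch = ')' ∨ ch = ']' then depth0 - 1 else depth0
  if ch = ',' ∧ depth = 0 then
    let n := PySem.Chars.strip buf
    (depth, [], false, if n ≠ [] then names ++ [n] else names)
  else if ch = ':' ∧ seen = false then (depth, buf, true, names)
  else if seen = false then (depth, buf ++ [ch], seen, names)
  else (depth, buf, seen, names)

def extract_binders_py_alt (forall_text : String) : List String :=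
  let st := forall_text.toList.foldl pvStepB (0, [], false, [])
  let n := PySem.Chars.strip st.2.1
  ((if n ≠ [] then st.2.2.2 ++ [n] else st.2.2.2).map (fun cs => String.ofList cs))

-- ===== PRECONDITION & SPEC =====
def Spec_extract_binders_py (forall_text : String) (out : List String) : Prop := out = extract_binders_py_alt forall_text
instance (forall_text : String) (out : List String) : Decidable (Spec_extract_binders_py forall_text out) := by unfold Spec_extract_binders_py; infer_instance

-- ===== CLAIM (what is proved, stated in full; the proofs are below) =====
def Claim_equal_extract_binders_py : Prop := ∀ (forall_text : String), Dom_extract_binders_py forall_text → Spec_extract_binders_py forall_text (extract_binders_py forall_text)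

-- ===== LEMMAS AND PROOFS =====

-- general list helpers
theorem pv_take_idxOf (l : List Char) (a : Char) :
    l.take (l.idxOf a) = l.takeWhile (fun x => x ≠ a) := by
  induction l with
  | nil => simp
  | cons x xs ih =>
    by_cases h : x = a
    · subst h; simp [List.idxOf_cons_self]
    · simp [List.idxOf_cons_ne _ h, h, ih]

theorem pv_takeWhile_append_of_fail {p : Char → Bool} {l₁ : List Char} (l₂ : List Char)
    {a : Char} (ha : a ∈ l₁) (hpa : ¬ p a) :
    List.takeWhile p (l₁ ++ l₂) = List.takeWhile p l₁ := by
  induction l₁ with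
  | nil => simp at ha
  | cons x xs ih =>
    by_cases hx : p x
    · simp_all
      rcases ha with h|h
      · simp_all
      · simp_all
    · simp [hx]

theorem pv_mem_dropWhile {p : Char → Bool} {l : List Char} {a : Char}
    (ha : a ∈ l) (hpa : ¬ p a) : a ∈ List.dropWhile p l := by
  have h := List.takeWhile_append_dropWhile (p := p) (l := l)
  rw [← h] at ha
  rcases List.mem_append.1 ha with h'|h'
  · exact absurd (List.mem_takeWhile_imp h') hpa
  · exact h'

-- rstrip is a prefix; lstrip fixed points are preserved by rstrip
theorem pv_rstrip_prefix (l : List Char) : PySem.Chars.rstrip l <+: l := by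
  have h : List.dropWhile PySem.Chars.isspace l.reverse <:+ l.reverse :=
    List.dropWhile_suffix _
  simpa [PySem.Chars.rstrip] using List.reverse_suffix.mp (by simpa using h)

theorem pv_lstrip_rstrip {l : List Char} (h : PySem.Chars.lstrip l = l) :
    PySem.Chars.lstrip (PySem.Chars.rstrip l) = PySem.Chars.rstrip l := by
  rcases hr : PySem.Chars.rstrip l with _ | ⟨a, t⟩
  · simp [PySem.Chars.lstrip]
  · have hpre : a :: t <+: l := hr ▸ pv_rstrip_prefix l
    obtain ⟨rest, hrest⟩ := hpre
    have hws : PySem.Chars.isspace a = false := by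
      by_contra hcon
      have hws' : PySem.Chars.isspace a = true := by
        cases hx : PySem.Chars.isspace a <;> simp_all
      rw [← hrest] at h
      simp [PySem.Chars.lstrip, hws'] at h
      have hlen := congrArg List.length h
      have hle := List.length_dropWhile_le (p := PySem.Chars.isspace) (l := t ++ rest)
      simp [List.length_append] at hlen hle
      omega
    simp [PySem.Chars.lstrip, hws]

theorem pv_rstrip_idem (l : List Char) :
    PySem.Chars.rstrip (PySem.Chars.rstrip l) = PySem.Chars.rstrip l := by
  simp [PySem.Chars.rstrip, List.dropWhile_idempotent]

theorem pv_lstrip_idem (l : List Char) :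
    PySem.Chars.lstrip (PySem.Chars.lstrip l) = PySem.Chars.lstrip l := by
  simp [PySem.Chars.lstrip, List.dropWhile_idempotent]

theorem pv_strip_idem (l : List Char) :
    PySem.Chars.strip (PySem.Chars.strip l) = PySem.Chars.strip l := by
  unfold PySem.Chars.strip
  rw [pv_lstrip_rstrip (pv_lstrip_idem l), pv_rstrip_idem]

-- ':' survives strip
theorem pv_colon_mem_lstrip {l : List Char} (h : ':' ∈ l) :
    ':' ∈ PySem.Chars.lstrip l :=
  pv_mem_dropWhile h (by decide)

theorem pv_colon_mem_rstrip {l : List Char} (h : ':' ∈ l) :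
    ':' ∈ PySem.Chars.rstrip l := by
  have : ':' ∈ (List.dropWhile PySem.Chars.isspace l.reverse) :=
    pv_mem_dropWhile (by simpa using h) (by decide)
  simpa [PySem.Chars.rstrip] using this

theorem pv_colon_mem_strip {l : List Char} : ':' ∈ PySem.Chars.strip l ↔ ':' ∈ l := by
  constructor
  · intro h
    have h1 : PySem.Chars.strip l <+: PySem.Chars.lstrip l := pv_rstrip_prefix _
    have h2 : PySem.Chars.lstrip l <:+ l := List.dropWhile_suffix _
    exact h2.mem (h1.mem h)
  · intro h
    exact pv_colon_mem_rstrip (pv_colon_mem_lstrip h)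

theorem pv_takeWhile_rstrip {l : List Char} (h : ':' ∈ l) :
    (PySem.Chars.rstrip l).takeWhile (fun x => x ≠ ':') = l.takeWhile (fun x => x ≠ ':') := by
  obtain ⟨rest, hrest⟩ := pv_rstrip_prefix l
  conv_rhs => rw [← hrest]
  rw [pv_takeWhile_append_of_fail rest (pv_colon_mem_rstrip h) (by simp)]

theorem pv_takeWhile_lstrip (l : List Char) :
    l.takeWhile (fun x => x ≠ ':')
      = l.takeWhile PySem.Chars.isspace ++ (PySem.Chars.lstrip l).takeWhile (fun x => x ≠ ':') := by
  conv_lhs => rw [← List.takeWhile_append_dropWhile (p := PySem.Chars.isspace) (l := l)]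
  rw [PySem.Chars.lstrip]
  rw [List.takeWhile_append_of_pos]
  intro a ha
  have := List.mem_takeWhile_imp ha
  simp only [decide_eq_true_eq]
  rintro rfl
  simp [PySem.Chars.isspace] at this

theorem pv_strip_ws_append (l X : List Char) :
    PySem.Chars.strip (l.takeWhile PySem.Chars.isspace ++ X) = PySem.Chars.strip X := by
  unfold PySem.Chars.strip PySem.Chars.lstrip
  rw [List.dropWhile_append_of_pos]
  intro a ha
  exact List.mem_takeWhile_imp ha

theorem pv_key (cs : List Char) :
    (if ':' ∈ PySem.Chars.strip cs then
       PySem.Chars.strip ((PySem.Chars.strip cs).take ((PySem.Chars.strip cs).idxOf ':'))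
     else PySem.Chars.strip (PySem.Chars.strip cs))
      = PySem.Chars.strip (cs.takeWhile (fun x => x ≠ ':')) := by
  by_cases h : ':' ∈ cs
  · rw [if_pos (pv_colon_mem_strip.mpr h), pv_take_idxOf]
    show PySem.Chars.strip ((PySem.Chars.rstrip (PySem.Chars.lstrip cs)).takeWhile _) = _
    rw [pv_takeWhile_rstrip (pv_colon_mem_lstrip h),
        pv_takeWhile_lstrip cs, pv_strip_ws_append]
  · rw [if_neg (fun hc => h (pv_colon_mem_strip.mp hc)), pv_strip_idem]
    congr 1
    rw [List.takeWhile_eq_self_iff.mpr]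
    intro a ha
    simp only [decide_eq_true_eq]
    rintro rfl
    exact h ha



-- proof-side abstraction: B's state is A's state with the name-prefix, colon flag and
-- processed names precomputed
def pvPost (bs : List (List Char)) : List (List Char) :=
  (bs.map pvNameA).filter (· ≠ [])

def pvAbs (st : Int × List Char × List (List Char)) :
    Int × List Char × Bool × List (List Char) :=
  (st.1, st.2.1.takeWhile (fun x => x ≠ ':'), decide (':' ∈ st.2.1), pvPost st.2.2)

theorem pv_tw_snoc (cur : List Char) (ch : Char) (hne : ch ≠ ':') :
    (cur ++ [ch]).takeWhile (fun x => x ≠ ':')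
      = if ':' ∈ cur then cur.takeWhile (fun x => x ≠ ':')
        else cur.takeWhile (fun x => x ≠ ':') ++ [ch] := by
  by_cases h : ':' ∈ cur
  · rw [if_pos h, pv_takeWhile_append_of_fail [ch] h (by simp)]
  · have hall : ∀ a ∈ cur, (fun x => decide (x ≠ ':')) a = true := by
      intro a ha
      simp only [decide_eq_true_eq]
      rintro rfl
      exact h ha
    rw [if_neg h, List.takeWhile_append_of_pos hall, List.takeWhile_eq_self_iff.mpr hall]
    congr 1
    simp [hne]

theorem pv_tw_snoc_colon (cur : List Char) :
    (cur ++ [':']).takeWhile (fun x => x ≠ ':') = cur.takeWhile (fun x => x ≠ ':') := by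
  by_cases h : ':' ∈ cur
  · rw [pv_takeWhile_append_of_fail [':'] h (by simp)]
  · have hall : ∀ a ∈ cur, (fun x => decide (x ≠ ':')) a = true := by
      intro a ha
      simp only [decide_eq_true_eq]
      rintro rfl
      exact h ha
    rw [List.takeWhile_append_of_pos hall, List.takeWhile_eq_self_iff.mpr hall]
    simp

theorem pv_nameA_strip (cur : List Char) :
    pvNameA (PySem.Chars.strip cur)
      = PySem.Chars.strip (cur.takeWhile (fun x => x ≠ ':')) := by
  have := pv_key cur
  simpa [pvNameA, pv_strip_idem] using this

theorem pv_filter_singleton (x : List Char) :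
    List.filter (· ≠ []) [x] = if x ≠ [] then [x] else [] := by
  by_cases h : x = [] <;> simp [h]

theorem pv_post_snoc (bs : List (List Char)) (cur : List Char) :
    pvPost (bs ++ [PySem.Chars.strip cur])
      = pvPost bs ++ (if PySem.Chars.strip (cur.takeWhile (fun x => x ≠ ':')) ≠ [] then
          [PySem.Chars.strip (cur.takeWhile (fun x => x ≠ ':'))] else []) := by
  simp only [pvPost, List.map_append, List.filter_append, List.map_cons, List.map_nil,
    pv_nameA_strip, pv_filter_singleton]

theorem pv_step_comm (st : Int × List Char × List (List Char)) (ch : Char) :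
    pvStepB (pvAbs st) ch = pvAbs (pvStepA st ch) := by
  obtain ⟨d, cur, bs⟩ := st
  by_cases h1 : ch = '<' ∨ ch = '(' ∨ ch = '['
  · have hne : ch ≠ ':' := by rcases h1 with rfl|rfl|rfl <;> decide
    have hnc : ch ≠ ',' := by rcases h1 with rfl|rfl|rfl <;> decide
    simp only [pvStepA, pvStepB, pvAbs, if_pos h1, hnc, false_and, if_false,
      pv_tw_snoc cur ch hne]
    by_cases hm : ':' ∈ cur <;> simp [hm, hne, Ne.symm hne]
  · by_cases h2 : ch = '>' ∨ ch = ')' ∨ ch = ']'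
    · have hne : ch ≠ ':' := by rcases h2 with rfl|rfl|rfl <;> decide
      have hnc : ch ≠ ',' := by rcases h2 with rfl|rfl|rfl <;> decide
      simp only [pvStepA, pvStepB, pvAbs, if_neg h1, if_pos h2, hnc, false_and, if_false,
        pv_tw_snoc cur ch hne]
      by_cases hm : ':' ∈ cur <;> simp [hm, hne, Ne.symm hne]
    · by_cases h3 : ch = ',' ∧ d = 0
      · obtain ⟨rfl, rfl⟩ := h3
        simp only [pvStepA, pvStepB, pvAbs, if_neg h1, if_neg h2, and_self, if_pos trivial]
        rw [pv_post_snoc]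
        split_ifs <;> simp
      · by_cases h4 : ch = ':'
        · subst h4
          simp only [pvStepA, pvStepB, pvAbs, if_neg h1, if_neg h2, if_neg h3,
            pv_tw_snoc_colon]
          by_cases hm : ':' ∈ cur <;> simp [hm]
        · simp only [pvStepA, pvStepB, pvAbs, if_neg h1, if_neg h2, if_neg h3,
            pv_tw_snoc cur ch h4]
          by_cases hm : ':' ∈ cur <;> simp [hm, h4, Ne.symm h4]

theorem pv_final (cur : List Char) (bs : List (List Char)) :
    pvPost (if cur ≠ [] then bs ++ [PySem.Chars.strip cur] else bs)
      = (if PySem.Chars.strip (cur.takeWhile (fun x => x ≠ ':')) ≠ [] then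
          pvPost bs ++ [PySem.Chars.strip (cur.takeWhile (fun x => x ≠ ':'))] else pvPost bs) := by
  by_cases hc : cur = []
  · subst hc
    simp [PySem.Chars.strip, PySem.Chars.lstrip, PySem.Chars.rstrip]
  · rw [if_pos hc, pv_post_snoc]
    split_ifs <;> simp


-- ===== VERDICT (by name: the statement is the Claim_ definition above) =====
theorem extract_binders_py_spec : Claim_equal_extract_binders_py := by
  intro s _
  unfold Spec_extract_binders_py extract_binders_py extract_binders_py_alt
  have hfold : s.toList.foldl pvStepB ((0 : Int), ([] : List Char), false, ([] : List (List Char)))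
      = pvAbs (s.toList.foldl pvStepA (0, [], [])) := by
    have h0 : pvAbs ((0 : Int), ([] : List Char), ([] : List (List Char)))
        = ((0 : Int), ([] : List Char), false, ([] : List (List Char))) := by
      simp [pvAbs, pvPost]
    rw [← h0]
    exact List.foldl_hom pvAbs (fun x y => pv_step_comm x y)
  rw [hfold]
  obtain ⟨d, cur, bs⟩ := s.toList.foldl pvStepA (0, [], [])
  simp only [pvAbs]
  have hp : ∀ X : List (List Char),
      List.filter (fun x => decide (x ≠ [])) (List.map pvNameA X) = pvPost X := fun _ => rfl
  rw [hp, pv_final]
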